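-- pv_equiv track=rewrite | github.com/hiba-wajeeh/neetcode-submissions-y5cicn23 | Data Structures & Algorithms/score-of-a-string/submission-0.py | scoreOfString
-- ===== SOURCE A (Python) =====
-- def scoreOfString(s: str):
--     prefix = [0]*len(s)
--
--     for i in range(1, len(s)):
--         prefix[i] = abs(ord(s[i]) - ord(s[i-1]))
--
--     sum = 0
--     for i in range(1, len(prefix)):
--         sum = sum+prefix[i]
--
--     return sum
-- ===== SOURCE B (Python) =====
-- def scoreOfString(s: str):
--     # Divide and conquer: score of s[lo:hi] = score of left half + score of
--     # right half + the boundary pair straddling the split point.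
--     def solve(lo, hi):
--         if hi - lo < 2:
--             return 0
--         mid = (lo + hi) // 2
--         return solve(lo, mid) + solve(mid, hi) + abs(ord(s[mid]) - ord(s[mid - 1]))
--     return solve(0, len(s))
-- ===== Notes on version B (the rewrite author's own statement) =====
-- stated objective: alternative
-- what changed: Replaces A's two-pass table construction (fill a difference array by index, then sum it in a second loop) with a divide-and-conquer recursion: the score of a substring is the score of its left half plus the score of its right half plus the one boundary pair straddling the split, with no intermediate array and no linear pass.
import Mathlib
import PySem

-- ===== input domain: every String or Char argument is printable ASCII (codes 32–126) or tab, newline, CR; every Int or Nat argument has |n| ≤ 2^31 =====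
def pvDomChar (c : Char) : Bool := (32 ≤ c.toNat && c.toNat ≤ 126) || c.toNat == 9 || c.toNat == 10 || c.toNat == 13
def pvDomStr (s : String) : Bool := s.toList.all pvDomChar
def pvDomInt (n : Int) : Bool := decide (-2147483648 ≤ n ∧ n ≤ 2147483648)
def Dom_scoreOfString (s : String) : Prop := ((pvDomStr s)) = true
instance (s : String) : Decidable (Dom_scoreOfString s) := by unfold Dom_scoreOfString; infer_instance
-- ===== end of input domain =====

-- B replaces A's build-a-difference-table-then-sum-it two-pass structure with a
-- divide-and-conquer recursion over substring halves (objective: alternative).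

-- ===== PORT A =====
-- 'prefix[i] = …' with i drawn from range(1, len(s)) is an in-range non-negative
-- index assignment, which is exactly List.set i.toNat.
def scoreOfString (s : String) : Int :=
  let cs := s.toList
  let pre0 : List Int := List.replicate cs.length 0
  let pre :=
    (PySem.List.pyRange 1 cs.length).foldl
      (fun p i =>
        p.set i.toNat
          |((PySem.List.pyGetD cs i ' ').toNat : Int) -
            ((PySem.List.pyGetD cs (i - 1) ' ').toNat : Int)|)
      pre0
  (PySem.List.pyRange 1 pre.length).foldl
    (fun acc i => acc + PySem.List.pyGetD pre i 0) 0

-- ===== PORT B =====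
-- ord(s[i]): the indices reaching this are always in range, so getD is exact.
def pvCode (cs : List Char) (i : Nat) : Int := ((cs.getD i ' ').toNat : Int)

def pvSolve (cs : List Char) (lo hi : Nat) : Int :=
  if _h : hi - lo < 2 then 0
  else
    let mid := (lo + hi) / 2
    pvSolve cs lo mid + pvSolve cs mid hi + |pvCode cs mid - pvCode cs (mid - 1)|
termination_by hi - lo
decreasing_by all_goals omega

def scoreOfString_alt (s : String) : Int := pvSolve s.toList 0 s.toList.length

-- ===== PRECONDITION & SPEC =====
def Spec_scoreOfString (s : String) (out : Int) : Prop := out = scoreOfString_alt s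
instance (s : String) (out : Int) : Decidable (Spec_scoreOfString s out) := by unfold Spec_scoreOfString; infer_instance

-- ===== CLAIM (what is proved, stated in full; the proofs are below) =====
def Claim_equal_scoreOfString : Prop := ∀ (s : String), Dom_scoreOfString s → Spec_scoreOfString s (scoreOfString s)

-- ===== LEMMAS AND PROOFS =====

-- the per-pair contribution of A's table, oriented as |earlier - later|
def pvF (p : Char × Char) : Int := |((p.1.toNat : Int) - (p.2.toNat : Int))|

-- A's first loop fills slot i of the table with |cs[i] - cs[i-1]| and leaves slot 0 at 0
theorem pv_setfold (cs : List Char) (m : Nat) (hm : m + 1 ≤ cs.length) :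
    (PySem.List.pyRange 1 ((m : Int) + 1)).foldl
      (fun p i =>
        p.set i.toNat
          |((PySem.List.pyGetD cs i ' ').toNat : Int) -
            ((PySem.List.pyGetD cs (i - 1) ' ').toNat : Int)|)
      (List.replicate cs.length 0)
    = 0 :: ((cs.zip cs.tail).take m).map pvF ++ List.replicate (cs.length - 1 - m) 0 := by
  induction m with
  | zero =>
      have h2 : PySem.List.pyRange 1 (((0 : Nat) : Int) + 1) = [] := by
        norm_num [PySem.List.pyRange]
      rw [h2]
      obtain ⟨k, hk⟩ : ∃ k, cs.length = k + 1 := ⟨cs.length - 1, by omega⟩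
      simp [hk, List.replicate_succ]
  | succ m ih =>
      have hm' : m + 1 ≤ cs.length := by omega
      have hcast : (((m + 1 : Nat)) : Int) + 1 = ((m : Int) + 1) + 1 := by omega
      rw [hcast, PySem.List.pyRange_one_succ_right (by omega), List.foldl_append, ih hm']
      simp only [List.foldl_cons, List.foldl_nil]
      have ht : ((m : Int) + 1).toNat = m + 1 := by omega
      have hg1 : ((m : Int) + 1) = (((m + 1 : Nat)) : Int) := by omega
      have hg2 : ((m : Int) + 1) - 1 = ((m : Nat) : Int) := by ring
      simp only [ht, hg2]
      rw [hg1]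
      simp only [PySem.List.pyGetD_natCast]
      rw [List.getD_eq_getElem cs ' ' (show m + 1 < cs.length by omega),
          List.getD_eq_getElem cs ' ' (show m < cs.length by omega)]
      have hTlen : (((cs.zip cs.tail).take m).map pvF).length = m := by
        simp; omega
      rw [List.set_append]
      simp only [List.length_cons, hTlen, lt_irrefl, if_false, Nat.sub_self]
      rw [show cs.length - 1 - m = (cs.length - 2 - m) + 1 by omega, List.replicate_succ,
          List.set_cons_zero]
      have hpm : m < (cs.zip cs.tail).length := by
        simp [List.length_zip]; omega
      rw [← List.take_concat_get hpm]
      have hz : (cs.zip cs.tail)[m]'hpm = (cs[m]'(by omega), cs[m+1]'(by omega)) := by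
        rw [List.getElem_zip]
        congr 1
        rw [List.getElem_tail]
      simp only [List.concat_eq_append, List.map_append, List.map_cons, List.map_nil, hz]
      have : pvF (cs[m]'(by omega), cs[m+1]'(by omega)) =
          |((cs[m+1]'(by omega)).toNat : Int) - ((cs[m]'(by omega)).toNat : Int)| := by
        simp [pvF, abs_sub_comm]
      rw [this]
      simp [show cs.length - 1 - (m + 1) = cs.length - 2 - m by omega]

-- A's value is the sum of |cs[i]-cs[i+1]| over all adjacent pairs
theorem pv_A_eq_zipsum (s : String) :
    scoreOfString s = ((s.toList.zip s.toList.tail).map pvF).sum := by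
  simp only [scoreOfString]
  rcases hcs : s.toList with _ | ⟨c, rest⟩
  · norm_num [PySem.List.pyRange]
  · have h := pv_setfold (c :: rest) rest.length (by simp)
    have hcast : ((rest.length : Int)) + 1 = ((c :: rest).length : Int) := by
      push_cast [List.length_cons]; ring
    rw [← hcast, h]
    have hpl : ((c :: rest).zip (c :: rest).tail).length = rest.length := by
      simp [List.length_zip]
    rw [List.take_of_length_le (le_of_eq hpl),
        show (c :: rest).length - 1 - rest.length = 0 by simp, List.replicate_zero,
        List.append_nil]
    rw [PySem.List.foldl_add]
    have hmap := PySem.List.map_pyGetD_pyRange_zero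
      ((0 : Int) :: ((c :: rest).zip (c :: rest).tail).map pvF) 0
    rw [show PySem.List.len ((0 : Int) :: ((c :: rest).zip (c :: rest).tail).map pvF)
          = ((((c :: rest).zip (c :: rest).tail).map pvF).length : Int) + 1 by
        simp [PySem.List.len_eq]] at hmap
    rw [PySem.List.pyRange_one_cons (by omega)] at hmap
    simp only [List.map_cons, PySem.List.pyGetD_zero_cons, List.cons.injEq, true_and,
      zero_add] at hmap
    simp only [List.length_cons, List.tail_cons, List.length_map, Nat.cast_add,
      Nat.cast_one] at hmap ⊢
    rw [hmap]
    simp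

-- the zip-pair sum, re-indexed
theorem pv_zipsum_eq_range (cs : List Char) :
    ((cs.zip cs.tail).map pvF).sum
      = ∑ i ∈ Finset.range (cs.length - 1), |pvCode cs (i + 1) - pvCode cs i| := by
  induction cs with
  | nil => simp
  | cons a cs ih =>
      cases cs with
      | nil => simp
      | cons b t =>
          simp only [List.tail_cons, List.zip_cons_cons, List.map_cons, List.sum_cons,
            List.length_cons, Nat.add_sub_cancel]
          rw [Finset.sum_range_succ']
          have h0 : |pvCode (a :: b :: t) (0 + 1) - pvCode (a :: b :: t) 0| = pvF (a, b) := by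
            simp [pvCode, pvF, abs_sub_comm]
          have hsh : ∀ i, |pvCode (a :: b :: t) (i + 1 + 1) - pvCode (a :: b :: t) (i + 1)|
              = |pvCode (b :: t) (i + 1) - pvCode (b :: t) i| := by
            intro i; simp [pvCode]
          rw [h0]
          have ih' := ih
          simp only [List.tail_cons, List.length_cons, Nat.add_sub_cancel] at ih'
          rw [Finset.sum_congr rfl (fun i _ => hsh i), ← ih']
          ring

-- B's recursion computes the pair sum of the substring [lo, hi)
theorem pv_solve_eq (cs : List Char) (lo hi : Nat) :
    pvSolve cs lo hi = ∑ i ∈ Finset.Ico (lo + 1) hi, |pvCode cs i - pvCode cs (i - 1)| := by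
  fun_induction pvSolve cs lo hi with
  | case1 lo hi h =>
      rw [Finset.Ico_eq_empty (by omega), Finset.sum_empty]
  | case2 lo hi h mid ih1 ih2 =>
      rw [ih1, ih2]
      have hmid1 : lo + 1 ≤ mid := by omega
      have hmid2 : mid < hi := by omega
      rw [← Finset.sum_Ico_consecutive _ hmid1 (le_of_lt hmid2),
          Finset.sum_eq_sum_Ico_succ_bot hmid2]
      ring

-- ===== VERDICT (by name: the statement is the Claim_ definition above) =====
theorem scoreOfString_spec : Claim_equal_scoreOfString := by
  intro s _
  unfold Spec_scoreOfString scoreOfString_alt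
  rw [pv_A_eq_zipsum, pv_zipsum_eq_range, pv_solve_eq]
  rw [Finset.sum_Ico_eq_sum_range]
  exact Finset.sum_congr (by norm_num) fun i _ => by
    rw [Nat.add_comm 1 i, Nat.add_sub_cancel]
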